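-- pv_equiv track=rewrite | github.com/gematik/fhir-igs-workflow | scripts/refresh-special-urls.py | insert_special_url_block
-- ===== SOURCE A (Python) =====
-- def insert_special_url_block(block_lines: list[str], urls: list[str]) -> list[str]:
--     if not urls:
--         return block_lines
--
--     insert_at = 0
--     for index, line in enumerate(block_lines):
--         if line.startswith("  shownav:"):
--             insert_at = index + 1
--             break
--
--     new_block = ["  special-url:\n"]
--     new_block.extend(f"    - {url}\n" for url in urls)
--
--     return block_lines[:insert_at] + new_block + block_lines[insert_at:]
-- ===== SOURCE B (Python) =====
-- def insert_special_url_block(block_lines: list[str], urls: list[str]) -> list[str]: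
--     if not urls:
--         return block_lines
--
--     block = ["  special-url:\n"] + ["    - %s\n" % url for url in urls]
--
--     result = []
--     inserted = False
--     for line in block_lines:
--         result.append(line)
--         if not inserted and line.startswith("  shownav:"):
--             result.extend(block)
--             inserted = True
--
--     return result if inserted else block + result
-- ===== Notes on version B (the rewrite author's own statement) =====
-- stated objective: alternative
-- what changed: Replaces A's two-phase approach (enumerate to find the shownav index, then splice with slices) by a single pass that appends each line and extends with the precomputed block right after the first shownav line, prepending the block when none exists.
import Mathlib
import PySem

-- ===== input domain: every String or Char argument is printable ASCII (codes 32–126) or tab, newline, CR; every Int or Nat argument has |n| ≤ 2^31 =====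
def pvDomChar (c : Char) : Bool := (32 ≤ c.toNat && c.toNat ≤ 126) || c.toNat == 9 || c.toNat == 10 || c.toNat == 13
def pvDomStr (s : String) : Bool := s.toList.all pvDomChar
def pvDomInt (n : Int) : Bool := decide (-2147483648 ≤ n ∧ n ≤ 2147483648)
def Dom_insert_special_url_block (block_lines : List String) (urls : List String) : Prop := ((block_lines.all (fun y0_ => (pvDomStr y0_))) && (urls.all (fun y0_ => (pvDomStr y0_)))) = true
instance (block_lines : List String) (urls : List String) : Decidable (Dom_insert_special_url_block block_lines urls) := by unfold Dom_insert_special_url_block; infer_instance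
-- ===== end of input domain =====

-- B builds the output in one pass (append each line, extend with the precomputed block right
-- after the first shownav line, prepend if none) instead of A's find-index-then-splice; same cost.

-- ===== PORT A =====
-- A's 'for index, line in enumerate(...): if ...: insert_at = index + 1; break' (insert_at stays 0 if no hit)
def pvAFind : List (Int × String) → Int
  | [] => 0
  | (index, line) :: rest =>
      if PySem.Str.startswith line "  shownav:" then index + 1 else pvAFind rest

def insert_special_url_block (block_lines : List String) (urls : List String) : List String :=
  if urls = [] then block_lines
  else
    let insert_at := pvAFind (PySem.List.enumerate block_lines 0)
    -- f"    - {url}\n" as string concatenation via PySem.Str.join (exact)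
    let new_block := "  special-url:\n" :: urls.map (fun url => PySem.Str.join "" ["    - ", url, "\n"])
    PySem.List.slice block_lines none (some insert_at) ++ new_block ++
      PySem.List.slice block_lines (some insert_at) none

-- ===== PORT B =====
def insert_special_url_block_alt (block_lines : List String) (urls : List String) : List String :=
  if urls = [] then block_lines
  else
    let block := "  special-url:\n" :: urls.map (fun url => PySem.Str.join "" ["    - ", url, "\n"])
    -- 'for line in block_lines: result.append(line); if not inserted and ...: result.extend(block); inserted = True'
    let st := block_lines.foldl
      (fun (st : List String × Bool) line =>
        let r := st.1 ++ [line]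
        if !st.2 && PySem.Str.startswith line "  shownav:" then (r ++ block, true) else (r, st.2))
      ([], false)
    if st.2 then st.1 else block ++ st.1

-- ===== PRECONDITION & SPEC =====
def Spec_insert_special_url_block (block_lines : List String) (urls : List String) (out : List String) : Prop := out = insert_special_url_block_alt block_lines urls
instance (block_lines : List String) (urls : List String) (out : List String) : Decidable (Spec_insert_special_url_block block_lines urls out) := by unfold Spec_insert_special_url_block; infer_instance

-- ===== CLAIM (what is proved, stated in full; the proofs are below) =====
def Claim_equal_insert_special_url_block : Prop := ∀ (block_lines : List String) (urls : List String), Dom_insert_special_url_block block_lines urls → Spec_insert_special_url_block block_lines urls (insert_special_url_block block_lines urls)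

-- ===== LEMMAS AND PROOFS =====

-- abbreviations used only in the proofs
def pvP (line : String) : Bool := PySem.Str.startswith line "  shownav:"

-- the port's fold step, restated with nested ifs
def pvF (block : List String) (st : List String × Bool) (line : String) : List String × Bool :=
  if st.2 then (st.1 ++ [line], true)
  else if pvP line then (st.1 ++ [line] ++ block, true)
  else (st.1 ++ [line], false)

theorem pvF_eq (block : List String) :
    (fun (st : List String × Bool) line =>
        let r := st.1 ++ [line]
        if !st.2 && PySem.Str.startswith line "  shownav:" then (r ++ block, true) else (r, st.2))
      = pvF block := by
  funext st line
  rcases st with ⟨r, ins⟩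
  cases ins <;> by_cases h : pvP line = true <;>
    simp_all [pvF, pvP]

theorem pvF_pos (block : List String) (acc : List String) (x : String) (h : pvP x = true) :
    pvF block (acc, false) x = (acc ++ [x] ++ block, true) := by simp [pvF, h]

theorem pvF_neg (block : List String) (acc : List String) (x : String) (h : ¬ pvP x = true) :
    pvF block (acc, false) x = (acc ++ [x], false) := by simp [pvF, h]

theorem pvFoldTrue (block : List String) :
    ∀ (bl : List String) (acc : List String),
      bl.foldl (pvF block) (acc, true) = (acc ++ bl, true) := by
  intro bl
  induction bl with
  | nil => intro acc; simp
  | cons x xs ih =>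
      intro acc
      rw [List.foldl_cons]
      show xs.foldl (pvF block) (acc ++ [x], true) = _
      rw [ih]; simp

theorem pvFoldAcc (block : List String) :
    ∀ (bl : List String) (acc : List String),
      bl.foldl (pvF block) (acc, false) =
        (acc ++ (bl.foldl (pvF block) ([], false)).1, (bl.foldl (pvF block) ([], false)).2) := by
  intro bl
  induction bl with
  | nil => intro acc; simp
  | cons x xs ih =>
      intro acc
      rw [List.foldl_cons, List.foldl_cons]
      by_cases h : pvP x = true
      · rw [pvF_pos block acc x h, pvF_pos block [] x h, pvFoldTrue, pvFoldTrue]; simp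
      · rw [pvF_neg block acc x h, pvF_neg block [] x h, ih, ih ([] ++ [x])]; simp

theorem pvFoldNoMatch (block : List String) :
    ∀ (bl : List String), bl.any pvP = false →
      bl.foldl (pvF block) ([], false) = (bl, false) := by
  intro bl
  induction bl with
  | nil => intro _; simp
  | cons x xs ih =>
      intro h
      simp only [List.any_cons, Bool.or_eq_false_iff] at h
      rw [List.foldl_cons, pvF_neg block [] x (by simp [h.1]), pvFoldAcc, ih h.2]
      simp

theorem pvFoldSnd (block : List String) :
    ∀ (bl : List String), (bl.foldl (pvF block) ([], false)).2 = bl.any pvP := by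
  intro bl
  induction bl with
  | nil => simp
  | cons x xs ih =>
      rw [List.foldl_cons, List.any_cons]
      by_cases h : pvP x = true
      · rw [pvF_pos block [] x h, pvFoldTrue, h]; simp
      · rw [pvF_neg block [] x h, pvFoldAcc]
        simp only [Bool.not_eq_true] at h
        rw [h, ih]; simp

theorem pvAFind_noMatch :
    ∀ (bl : List String) (k : Int), bl.any pvP = false →
      pvAFind (PySem.List.enumerate bl k) = 0 := by
  intro bl
  induction bl with
  | nil => intro k _; simp [PySem.List.enumerate_nil, pvAFind]
  | cons x xs ih =>
      intro k h
      simp only [List.any_cons, Bool.or_eq_false_iff] at h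
      rw [PySem.List.enumerate_cons]
      simp only [pvAFind]
      rw [if_neg (by simp [pvP] at h ⊢; exact h.1)]
      exact ih _ h.2

theorem pvAFind_shift :
    ∀ (bl : List String) (k : Int), bl.any pvP = true →
      pvAFind (PySem.List.enumerate bl (k + 1)) = pvAFind (PySem.List.enumerate bl k) + 1 := by
  intro bl
  induction bl with
  | nil => intro k h; simp at h
  | cons x xs ih =>
      intro k h
      rw [PySem.List.enumerate_cons, PySem.List.enumerate_cons]
      simp only [pvAFind]
      by_cases hx : pvP x = true
      · rw [if_pos (by simpa [pvP] using hx), if_pos (by simpa [pvP] using hx)]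
      · rw [if_neg (by simpa [pvP] using hx), if_neg (by simpa [pvP] using hx)]
        simp only [List.any_cons, hx, Bool.false_or] at h
        exact ih _ h

theorem pvAFind_nonneg :
    ∀ (bl : List String) (k : Int), 0 ≤ k → 0 ≤ pvAFind (PySem.List.enumerate bl k) := by
  intro bl
  induction bl with
  | nil => intro k _; simp [PySem.List.enumerate_nil, pvAFind]
  | cons x xs ih =>
      intro k hk
      rw [PySem.List.enumerate_cons]
      simp only [pvAFind]
      by_cases hx : PySem.Str.startswith x "  shownav:" = true
      · rw [if_pos hx]; omega
      · rw [if_neg hx]; exact ih _ (by omega)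

theorem pvMain (block : List String) :
    ∀ (bl : List String),
      PySem.List.slice bl none (some (pvAFind (PySem.List.enumerate bl 0))) ++ block ++
        PySem.List.slice bl (some (pvAFind (PySem.List.enumerate bl 0))) none =
      (if (bl.foldl (pvF block) ([], false)).2 then (bl.foldl (pvF block) ([], false)).1
       else block ++ (bl.foldl (pvF block) ([], false)).1) := by
  intro bl
  induction bl with
  | nil =>
      simp [PySem.List.enumerate_nil, pvAFind, PySem.List.slice]
  | cons x xs ih =>
      rw [PySem.List.enumerate_cons, List.foldl_cons]
      by_cases hx : pvP x = true
      · -- first line matches: insert_at = 1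
        simp only [pvAFind]
        rw [if_pos (by simpa [pvP] using hx), pvF_pos block [] x hx, pvFoldTrue,
            PySem.List.slice_to _ (by omega : (0:Int) ≤ 0 + 1),
            PySem.List.slice_from _ (by omega : (0:Int) ≤ 0 + 1)]
        simp
      · -- first line does not match
        simp only [pvAFind]
        rw [if_neg (by simpa [pvP] using hx), pvF_neg block [] x hx, pvFoldAcc,
            show PySem.List.enumerate xs (0 + 1) = PySem.List.enumerate xs 1 by norm_num]
        by_cases hm : xs.any pvP = true
        · -- match later: insert point shifts by one
          rw [show (1 : Int) = 0 + 1 by norm_num, pvAFind_shift xs 0 hm]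
          have hn : 0 ≤ pvAFind (PySem.List.enumerate xs 0) := pvAFind_nonneg xs 0 (by omega)
          have ht : (pvAFind (PySem.List.enumerate xs 0) + 1).toNat =
              (pvAFind (PySem.List.enumerate xs 0)).toNat + 1 := by omega
          rw [PySem.List.slice_to _ (by omega), PySem.List.slice_from _ (by omega), ht,
              List.take_succ_cons, List.drop_succ_cons,
              ← PySem.List.slice_to _ hn, ← PySem.List.slice_from _ hn,
              pvFoldSnd, hm]
          rw [pvFoldSnd, hm] at ih
          simp only [if_true] at ih ⊢
          rw [List.cons_append, List.cons_append, ih]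
          simp
        · -- no match anywhere: insert_at = 0
          simp only [Bool.not_eq_true] at hm
          rw [pvAFind_noMatch xs 1 hm, pvFoldNoMatch block xs hm,
              PySem.List.slice_to _ (by omega : (0:Int) ≤ 0),
              PySem.List.slice_from _ (by omega : (0:Int) ≤ 0)]
          simp

-- ===== VERDICT (by name: the statement is the Claim_ definition above) =====
theorem insert_special_url_block_spec : Claim_equal_insert_special_url_block := by
  intro block_lines urls _
  unfold Spec_insert_special_url_block insert_special_url_block insert_special_url_block_alt
  by_cases hu : urls = []
  · simp [hu]
  · rw [if_neg hu, if_neg hu]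
    simp only []
    rw [pvF_eq]
    exact pvMain _ block_lines
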